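-- pv_equiv track=rewrite | github.com/kiraskywing/Code_Practice | CodeSignal/russia-bricks.py | solution
-- ===== SOURCE A (Python) =====
-- def convert(arr, offset):
--     res = []
--     for row in arr:
--         num = 0
--         for d in row:
--             num = num * 2 + d
--         res.append(num << offset)
--     return res
--
-- def solution(field, figure):
--     cols_f = len(field[0])
--     cols_p = len(figure[0])
--
--     f, p = convert(field, 0), convert(figure, cols_f - cols_p)
--     one_row = sum(1 << i for i in range(cols_f))
--     m, n = len(f), len(p)
--
--     for shift in range(cols_f - cols_p + 1):
--         if shift > 0:
--             for i in range(n):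
--                 p[i] >>= 1
--
--         for i in range(m - 1, n - 2, -1):
--             has_one_row = False
--             not_intersect = True
--             for j in range(n):
--                 if (f[i - j] & p[n - 1 - j]) > 0:
--                     not_intersect = False
--                     break
--                 if (f[i - j] | p[n - 1 - j]) == one_row:
--                     has_one_row = True
--
--             if has_one_row and not_intersect:
--                 return shift
--
--     return -1
-- ===== SOURCE B (Python) =====
-- def solution(field, figure):
--     cols_f, cols_p = len(field[0]), len(figure[0])
--     k = cols_f - cols_p
--
--     def pack(row):
--         return (row[0] << (len(row) - 1)) + pack(row[1:]) if row else 0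
--
--     f = [pack(row) for row in field]
--     q = [pack(row) for row in figure]
--     full = (1 << cols_f) - 1
--
--     valid = set()
--     for bottom in range(len(q) - 1, len(f)):
--         window = f[bottom - len(q) + 1:bottom + 1]
--         for s in range(k + 1):
--             masks = [y << (k - s) for y in q]
--             if (not any(x & y > 0 for x, y in zip(window, masks))
--                     and any(x | y == full for x, y in zip(window, masks))):
--                 valid.add(s)
--     return min(valid) if valid else -1
-- ===== Notes on version B (the rewrite author's own statement) =====
-- stated objective: alternative
-- what changed: B replaces A's shift-major early-return scan over pre-offset, destructively right-shifted figure masks with a window-major exhaustive search: it packs each row right-aligned by head recursion, recomputes the shifted masks for every (window, shift) pair, collects every shift that admits a valid placement into a set, and returns the minimum of that set (A's leftmost-first ordering becomes a min aggregation).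
import Mathlib
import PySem

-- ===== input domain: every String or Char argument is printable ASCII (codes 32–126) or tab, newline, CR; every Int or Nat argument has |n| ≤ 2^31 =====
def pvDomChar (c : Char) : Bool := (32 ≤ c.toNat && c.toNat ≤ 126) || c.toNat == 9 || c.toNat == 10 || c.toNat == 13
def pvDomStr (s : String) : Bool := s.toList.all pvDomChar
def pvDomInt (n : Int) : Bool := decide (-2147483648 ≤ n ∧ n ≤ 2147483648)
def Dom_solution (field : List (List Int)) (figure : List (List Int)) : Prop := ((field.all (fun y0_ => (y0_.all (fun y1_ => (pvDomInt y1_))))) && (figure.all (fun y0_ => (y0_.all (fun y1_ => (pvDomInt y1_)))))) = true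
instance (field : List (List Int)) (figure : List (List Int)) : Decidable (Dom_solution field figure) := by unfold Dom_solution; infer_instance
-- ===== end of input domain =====

-- B replaces A's shift-major early-return scan over pre-offset, destructively right-shifted
-- masks by a window-major exhaustive search: rows are packed right-aligned by recursion, the
-- shifted masks are recomputed per shift, every valid shift is collected into a set and the
-- set's minimum is returned (objective: alternative; same asymptotic cost).

-- ===== PORT A =====
def pvConvert (arr : List (List Int)) (offset : Nat) : List Int :=
  arr.foldl (fun (res : List Int) (row : List Int) =>
    let num : Int := row.foldl (fun num d => num * 2 + d) 0
    res ++ [num <<< offset]) []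

-- the j-loop: the pair (has_one_row, not_intersect) is returned as the conjunction A tests
def pvScanJ (f p : List Int) (one_row : Int) (i : Int) : List Int → Bool → Bool
  | [], has => has
  | j :: js, has =>
    let a := PySem.List.pyGetD f (i - j) 0
    let b := PySem.List.pyGetD p ((p.length : Int) - 1 - j) 0
    if PySem.Int.band a b > 0 then false
    else pvScanJ f p one_row i js (has || decide (PySem.Int.bor a b = one_row))

def pvScanI (f p : List Int) (one_row : Int) (n : Int) : List Int → Bool
  | [] => false
  | i :: is =>
    if pvScanJ f p one_row i (PySem.List.pyRange 0 n 1) false then true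
    else pvScanI f p one_row n is

def pvShiftLoop (f : List Int) (one_row : Int) (m n : Int) : List Int → List Int → Int
  | [], _ => -1
  | s :: ss, p0 =>
    let p := if s > 0 then p0.map (fun (v : Int) => v >>> (1 : Nat)) else p0
    if pvScanI f p one_row n (PySem.List.pyRange (m - 1) (n - 2) (-1)) then s
    else pvShiftLoop f one_row m n ss p

def solution (field : List (List Int)) (figure : List (List Int)) : Int :=
  let cols_f := (PySem.List.pyGetD field 0 []).length
  let cols_p := (PySem.List.pyGetD figure 0 []).length
  let f := pvConvert field 0
  let p := pvConvert figure (cols_f - cols_p)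
  let one_row := ((PySem.List.pyRange 0 (cols_f : Int) 1).map (fun (i : Int) => (1 : Int) <<< i.toNat)).sum
  pvShiftLoop f one_row (f.length : Int) (p.length : Int)
    (PySem.List.pyRange 0 ((cols_f : Int) - (cols_p : Int) + 1) 1) p

-- ===== PORT B =====
-- pack(row): right-aligned value of a row, by head recursion
def pvPackB : List Int → Int
  | [] => 0
  | d :: ds => (d <<< ds.length) + pvPackB ds

-- the placement test: no window/mask pair intersects, and some pair unions to a full row
def pvOkB (window masks : List Int) (full : Int) : Bool :=
  !((window.zip masks).any (fun ab => decide (PySem.Int.band ab.1 ab.2 > 0))) &&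
  ((window.zip masks).any (fun ab => decide (PySem.Int.bor ab.1 ab.2 = full)))

-- inner loop: add every shift s whose placement over this window is valid
def pvShiftsB (window q : List Int) (full k : Int) (acc : PySem.Set Int) : List Int → PySem.Set Int
  | [] => acc
  | s :: ss =>
    let masks := q.map (fun (y : Int) => y <<< (k - s).toNat)
    pvShiftsB window q full k
      (if pvOkB window masks full then PySem.Set.add acc s else acc) ss

-- outer loop over bottom rows of the landing window
def pvBottomsB (f q : List Int) (full k n : Int) (acc : PySem.Set Int) : List Int → PySem.Set Int
  | [] => acc
  | b :: bs =>
    pvBottomsB f q full k n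
      (pvShiftsB (PySem.List.slice f (some (b - n + 1)) (some (b + 1))) q full k acc
        (PySem.List.pyRange 0 (k + 1) 1)) bs

def solution_alt (field : List (List Int)) (figure : List (List Int)) : Int :=
  let cols_f := (PySem.List.pyGetD field 0 []).length
  let cols_p := (PySem.List.pyGetD figure 0 []).length
  let k : Int := (cols_f : Int) - (cols_p : Int)
  let f := field.map pvPackB
  let q := figure.map pvPackB
  let full : Int := ((1 : Int) <<< cols_f) - 1
  let valid := pvBottomsB f q full k (figure.length : Int) PySem.Set.empty
      (PySem.List.pyRange ((figure.length : Int) - 1) (f.length : Int) 1)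
  match PySem.List.min? valid (fun x => x) with
  | some v => v
  | none => -1

-- ===== PRECONDITION & SPEC =====
-- Pre_ excludes exactly the inputs where A raises: an empty field or figure (IndexError on
-- field[0]/figure[0]) and a figure row 0 wider than field row 0 (ValueError: negative shift count).
def Pre_solution (field : List (List Int)) (figure : List (List Int)) : Prop :=
  field ≠ [] ∧ figure ≠ [] ∧
  (PySem.List.pyGetD figure 0 []).length ≤ (PySem.List.pyGetD field 0 []).length

instance (field : List (List Int)) (figure : List (List Int)) : Decidable (Pre_solution field figure) := by
  unfold Pre_solution; infer_instance

def pvWitness_solution : List (List Int) × List (List Int) := ([[1, 0], [1, 0]], [[1]])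

def Spec_solution (field : List (List Int)) (figure : List (List Int)) (out : Int) : Prop :=
  out = solution_alt field figure
instance (field : List (List Int)) (figure : List (List Int)) (out : Int) : Decidable (Spec_solution field figure out) := by
  unfold Spec_solution; infer_instance

-- ===== CLAIM (what is proved, stated in full; the proofs are below) =====
def Claim_equal_solution : Prop := ∀ (field : List (List Int)) (figure : List (List Int)), Dom_solution field figure → Pre_solution field figure → Spec_solution field figure (solution field figure)

-- ===== LEMMAS AND PROOFS =====

-- bitmask first-match scan used as the middle point of the proof: A's loops are first
-- reduced to this scan (eliminating the destructive shifts), which is then shown equal to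
-- B's collect-and-take-minimum search
def pvShiftScan (f q : List Int) (full : Int) (kk : Nat) (m n : Int) : List Int → Int
  | [] => -1
  | s :: ss =>
    let p := q.map (fun (v : Int) => v <<< (kk - s.toNat))
    if (PySem.List.pyRange (n - 1) m 1).any (fun bottom =>
         pvOkB (PySem.List.slice f (some (bottom - n + 1)) (some (bottom + 1))) p full)
    then s else pvShiftScan f q full kk m n ss

lemma pvHorner_eq (row : List Int) : ∀ a : Int,
    row.foldl (fun (num : Int) d => num * 2 + d) a = a <<< row.length + pvPackB row := by
  induction row with
  | nil => intro a; simp [pvPackB, Int.shiftLeft_eq]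
  | cons d ds ih =>
    intro a
    simp only [List.foldl_cons, List.length_cons, pvPackB]
    rw [ih (a * 2 + d)]
    simp only [Int.shiftLeft_eq, pow_succ]
    ring

lemma pvHorner_zero (row : List Int) :
    row.foldl (fun (num : Int) d => num * 2 + d) 0 = pvPackB row := by
  rw [pvHorner_eq row 0]; simp [Int.shiftLeft_eq]

lemma pvConvert_eq (arr : List (List Int)) (offset : Nat) :
    pvConvert arr offset = arr.map (fun row => pvPackB row <<< offset) := by
  unfold pvConvert
  simp only [pvHorner_zero]
  rw [PySem.List.foldl_append_singleton_eq_map]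
  simp

lemma pvOneRow_eq (c : Nat) :
    ((PySem.List.pyRange 0 (c : Int) 1).map (fun (i : Int) => (1 : Int) <<< i.toNat)).sum
      = ((1 : Int) <<< c) - 1 := by
  induction c with
  | zero =>
    rw [show ((0 : Nat) : Int) = 0 from rfl, PySem.List.pyRange_one_eq_nil le_rfl]
    simp [Int.shiftLeft_eq]
  | succ c ih =>
    have hcast : ((c + 1 : Nat) : Int) = (c : Int) + 1 := by omega
    rw [hcast, PySem.List.pyRange_one_succ_right (by omega)]
    simp only [List.map_append, List.sum_append, List.map_cons, List.map_nil,
      List.sum_cons, List.sum_nil, ih, Int.toNat_natCast]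
    simp only [Int.shiftLeft_eq, pow_succ]
    ring

lemma pvShr1 (x : Int) (k : Nat) : (x <<< (k + 1)) >>> (1 : Nat) = x <<< k := by
  rw [Int.shiftRight_eq_div_pow, Int.shiftLeft_eq, Int.shiftLeft_eq, pow_succ, pow_one,
    ← mul_assoc]
  push_cast
  exact Int.mul_ediv_cancel _ (by norm_num)

lemma pvScanJ_eq (f p : List Int) (one_row : Int) (i : Int) : ∀ (js : List Int) (has : Bool),
    pvScanJ f p one_row i js has =
      (!(js.any (fun j => decide (PySem.Int.band (PySem.List.pyGetD f (i - j) 0)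
            (PySem.List.pyGetD p ((p.length : Int) - 1 - j) 0) > 0))) &&
       (has || js.any (fun j => decide (PySem.Int.bor (PySem.List.pyGetD f (i - j) 0)
            (PySem.List.pyGetD p ((p.length : Int) - 1 - j) 0) = one_row)))) := by
  intro js
  induction js with
  | nil => intro has; simp [pvScanJ]
  | cons j js ih =>
    intro has
    simp only [pvScanJ, List.any_cons]
    by_cases h : PySem.Int.band (PySem.List.pyGetD f (i - j) 0)
        (PySem.List.pyGetD p ((p.length : Int) - 1 - j) 0) > 0
    · simp [h]
    · rw [if_neg h, ih]
      simp [h, Bool.or_assoc]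

lemma pvScanI_eq_any (f p : List Int) (one_row : Int) (n : Int) : ∀ is : List Int,
    pvScanI f p one_row n is
      = is.any (fun i => pvScanJ f p one_row i (PySem.List.pyRange 0 n 1) false) := by
  intro is
  induction is with
  | nil => simp [pvScanI]
  | cons i is ih =>
    simp only [pvScanI, List.any_cons, ih]
    by_cases h : pvScanJ f p one_row i (PySem.List.pyRange 0 n 1) false = true
    · simp [h]
    · simp [h]

lemma pvRangeAny_eq (f p : List Int) (g : Int → Int → Bool) (i : Int)
    (hi1 : (p.length : Int) - 1 ≤ i) (hi2 : i < (f.length : Int)) :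
    (PySem.List.pyRange 0 (p.length : Int) 1).any (fun j =>
        g (PySem.List.pyGetD f (i - j) 0) (PySem.List.pyGetD p ((p.length : Int) - 1 - j) 0))
    = ((PySem.List.slice f (some (i - (p.length : Int) + 1)) (some (i + 1))).zip p).any
        (fun ab => g ab.1 ab.2) := by
  have h0 : (0 : Int) ≤ i - (p.length : Int) + 1 := by omega
  have h1 : (0 : Int) ≤ i + 1 := by omega
  rw [PySem.List.slice_toNat f h0 h1]
  set a : Nat := (i - (p.length : Int) + 1).toNat with ha
  set b : Nat := (i + 1).toNat - a with hb
  have hrowlen : ((f.drop a).take b).length = p.length := by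
    simp only [List.length_take, List.length_drop]
    omega
  have hziplen : (((f.drop a).take b).zip p).length = p.length := by
    simp only [List.length_zip, hrowlen, min_self]
  have hrow : ∀ (r : Nat) (hr : r < p.length),
      ((f.drop a).take b)[r]'(by rw [hrowlen]; exact hr) = f[a + r]'(by omega) := by
    intro r hr
    rw [List.getElem_take, List.getElem_drop]
  rw [Bool.eq_iff_iff, List.any_eq_true, List.any_eq_true]
  constructor
  · rintro ⟨j, hj, hg⟩
    rw [PySem.List.mem_pyRange_one] at hj
    have hr : ((p.length : Int) - 1 - j).toNat < p.length := by omega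
    refine ⟨(((f.drop a).take b).zip p)[((p.length : Int) - 1 - j).toNat]'(by rw [hziplen]; exact hr),
        List.getElem_mem _, ?_⟩
    rw [List.getElem_zip]
    dsimp only
    have e1 : ((f.drop a).take b)[((p.length : Int) - 1 - j).toNat]'(by rw [hrowlen]; exact hr)
        = PySem.List.pyGetD f (i - j) 0 := by
      rw [hrow _ hr, PySem.List.pyGetD_eq_getElem f (i := i - j) 0 (by omega) (by omega)]
      congr 1
      omega
    have e2 : p[((p.length : Int) - 1 - j).toNat]'hr
        = PySem.List.pyGetD p ((p.length : Int) - 1 - j) 0 := by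
      rw [PySem.List.pyGetD_eq_getElem p (i := (p.length : Int) - 1 - j) 0 (by omega) (by omega)]
    rw [e1, e2]
    exact hg
  · rintro ⟨ab, hab, hg⟩
    rw [List.mem_iff_getElem] at hab
    obtain ⟨r, hrlen, hab⟩ := hab
    have hr : r < p.length := by rw [hziplen] at hrlen; exact hrlen
    subst hab
    rw [List.getElem_zip] at hg
    dsimp only at hg
    refine ⟨(p.length : Int) - 1 - (r : Int), by rw [PySem.List.mem_pyRange_one]; omega, ?_⟩
    have e1 : PySem.List.pyGetD f (i - ((p.length : Int) - 1 - (r : Int))) 0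
        = ((f.drop a).take b)[r]'(by rw [hrowlen]; exact hr) := by
      rw [hrow _ hr,
        PySem.List.pyGetD_eq_getElem f (i := i - ((p.length : Int) - 1 - (r : Int))) 0
          (by omega) (by omega)]
      congr 1
      omega
    have e2 : PySem.List.pyGetD p ((p.length : Int) - 1 - ((p.length : Int) - 1 - (r : Int))) 0
        = p[r]'hr := by
      rw [PySem.List.pyGetD_eq_getElem p
          (i := (p.length : Int) - 1 - ((p.length : Int) - 1 - (r : Int))) 0 (by omega) (by omega)]
      congr 1
      omega
    rw [e1, e2]
    exact hg

lemma pvCheck_eq (f p : List Int) (full : Int) :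
    pvScanI f p full (p.length : Int)
        (PySem.List.pyRange ((f.length : Int) - 1) ((p.length : Int) - 2) (-1))
      = (PySem.List.pyRange ((p.length : Int) - 1) (f.length : Int) 1).any (fun bottom =>
          pvOkB (PySem.List.slice f (some (bottom - (p.length : Int) + 1)) (some (bottom + 1)))
            p full) := by
  rw [pvScanI_eq_any, PySem.List.pyRange_neg_one_eq_reverse]
  have e1 : ((p.length : Int) - 2 + 1) = (p.length : Int) - 1 := by ring
  have e2 : ((f.length : Int) - 1 + 1) = (f.length : Int) := by ring
  rw [e1, e2, List.any_reverse]
  have key : ∀ i ∈ PySem.List.pyRange ((p.length : Int) - 1) (f.length : Int) 1,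
      pvScanJ f p full i (PySem.List.pyRange 0 (p.length : Int) 1) false
        = pvOkB (PySem.List.slice f (some (i - (p.length : Int) + 1)) (some (i + 1))) p full := by
    intro i hi
    rw [PySem.List.mem_pyRange_one] at hi
    have hband := pvRangeAny_eq f p (fun x y => decide (PySem.Int.band x y > 0)) i
      (by omega) (by omega)
    have hbor := pvRangeAny_eq f p (fun x y => decide (PySem.Int.bor x y = full)) i
      (by omega) (by omega)
    dsimp only at hband hbor
    rw [pvScanJ_eq, hband, hbor, pvOkB]
    simp only [Bool.false_or]
  rw [Bool.eq_iff_iff, List.any_eq_true, List.any_eq_true]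
  constructor
  · rintro ⟨i, hi, hs⟩
    exact ⟨i, hi, by rw [← key i hi]; exact hs⟩
  · rintro ⟨i, hi, hs⟩
    exact ⟨i, hi, by rw [key i hi]; exact hs⟩

lemma pvOuter_eq (f q : List Int) (full : Int) (kk : Nat) (m n : Int)
    (hm : m = (f.length : Int)) (hn : n = (q.length : Int)) :
    ∀ (d t : Nat) (p_in : List Int), t + d = kk + 1 →
      p_in = q.map (fun (v : Int) => v <<< (kk - (t - 1))) →
      pvShiftLoop f full m n (PySem.List.pyRange (t : Int) ((kk : Int) + 1) 1) p_in
        = pvShiftScan f q full kk m n (PySem.List.pyRange (t : Int) ((kk : Int) + 1) 1) := by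
  subst hm hn
  intro d
  induction d with
  | zero =>
    intro t p_in ht hp
    rw [PySem.List.pyRange_one_eq_nil (by omega)]
    simp [pvShiftLoop, pvShiftScan]
  | succ d ih =>
    intro t p_in ht hp
    rw [PySem.List.pyRange_one_cons (by omega)]
    simp only [pvShiftLoop, pvShiftScan]
    have hpcur : (if ((t : Int)) > 0 then p_in.map (fun (v : Int) => v >>> (1 : Nat)) else p_in)
        = q.map (fun (v : Int) => v <<< (kk - t)) := by
      by_cases h0 : t = 0
      · subst h0
        rw [if_neg (by omega), hp]
      · rw [if_pos (by omega), hp, List.map_map]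
        apply List.map_congr_left
        intro v _
        show (v <<< (kk - (t - 1))) >>> (1 : Nat) = v <<< (kk - t)
        have he : kk - (t - 1) = (kk - t) + 1 := by omega
        rw [he, pvShr1]
    rw [hpcur]
    have htn : ((t : Int)).toNat = t := by simp
    have hcond := pvCheck_eq f (q.map (fun (v : Int) => v <<< (kk - t))) full
    rw [List.length_map] at hcond
    rw [hcond, htn]
    by_cases hfound : (PySem.List.pyRange ((q.length : Int) - 1) ((f.length : Int)) 1).any
        (fun bottom => pvOkB
          (PySem.List.slice f (some (bottom - (q.length : Int) + 1)) (some (bottom + 1)))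
          (q.map (fun (v : Int) => v <<< (kk - t))) full) = true
    · rw [if_pos hfound, if_pos hfound]
    · rw [if_neg hfound, if_neg hfound]
      have hcast : ((t : Int) + 1) = (((t + 1 : Nat)) : Int) := by omega
      rw [hcast]
      exact ih (t + 1) _ (by omega) (by rw [Nat.add_sub_cancel])

-- A reduced to the bitmask scan
lemma pvA_eq_scan (field figure : List (List Int))
    (hle : (PySem.List.pyGetD figure 0 []).length ≤ (PySem.List.pyGetD field 0 []).length) :
    solution field figure
      = pvShiftScan (field.map pvPackB) (figure.map pvPackB)
          (((1 : Int) <<< (PySem.List.pyGetD field 0 []).length) - 1)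
          ((PySem.List.pyGetD field 0 []).length - (PySem.List.pyGetD figure 0 []).length)
          (field.length : Int) (figure.length : Int)
          (PySem.List.pyRange 0
            (((PySem.List.pyGetD field 0 []).length : Int)
              - ((PySem.List.pyGetD figure 0 []).length : Int) + 1) 1) := by
  unfold solution
  dsimp only
  rw [pvConvert_eq, pvConvert_eq, pvOneRow_eq]
  set cf := (PySem.List.pyGetD field 0 []).length with hcf
  set cp := (PySem.List.pyGetD figure 0 []).length with hcp
  have hA : field.map (fun row => pvPackB row <<< (0 : Nat)) = field.map pvPackB := by
    apply List.map_congr_left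
    intro row _
    simp [Int.shiftLeft_eq]
  rw [hA]
  have hK : (cf : Int) - (cp : Int) + 1 = ((cf - cp : Nat) : Int) + 1 := by omega
  rw [hK]
  simp only [List.length_map]
  have hz : ((0 : Nat) : Int) = (0 : Int) := rfl
  have hp0 : figure.map (fun row => pvPackB row <<< (cf - cp))
      = (figure.map pvPackB).map (fun (v : Int) => v <<< ((cf - cp) - (0 - 1))) := by
    rw [List.map_map]
    simp [Function.comp]
  have hmain := pvOuter_eq (field.map pvPackB) (figure.map pvPackB) (((1 : Int) <<< cf) - 1) (cf - cp)
    (field.length : Int) (figure.length : Int) (by simp) (by simp)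
    (cf - cp + 1) 0 (figure.map (fun row => pvPackB row <<< (cf - cp))) (by omega) hp0
  rw [hz] at hmain
  exact hmain

lemma pvAnyRange_iff (a b : Int) (g : Int → Bool) :
    (PySem.List.pyRange a b 1).any g = true ↔ ∃ x : Int, a ≤ x ∧ x < b ∧ g x = true := by
  rw [List.any_eq_true]
  constructor
  · rintro ⟨x, hx, hg⟩
    rw [PySem.List.mem_pyRange_one] at hx
    exact ⟨x, hx.1, hx.2, hg⟩
  · rintro ⟨x, h1, h2, hg⟩
    exact ⟨x, by rw [PySem.List.mem_pyRange_one]; exact ⟨h1, h2⟩, hg⟩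

lemma pvShiftsB_mem (window q : List Int) (full k : Int) :
    ∀ (l : List Int) (acc : PySem.Set Int) (x : Int),
      x ∈ pvShiftsB window q full k acc l
        ↔ x ∈ acc ∨ (x ∈ l ∧
            pvOkB window (q.map (fun (y : Int) => y <<< (k - x).toNat)) full = true) := by
  intro l
  induction l with
  | nil => intro acc x; simp [pvShiftsB]
  | cons s ss ih =>
    intro acc x
    simp only [pvShiftsB]
    rw [ih]
    by_cases hc : pvOkB window (q.map (fun (y : Int) => y <<< (k - s).toNat)) full = true
    · rw [if_pos hc, PySem.Set.mem_add]
      simp only [List.mem_cons]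
      constructor
      · rintro ((h | rfl) | ⟨h1, h2⟩)
        · exact Or.inl h
        · exact Or.inr ⟨Or.inl rfl, hc⟩
        · exact Or.inr ⟨Or.inr h1, h2⟩
      · rintro (h | ⟨rfl | h1, h2⟩)
        · exact Or.inl (Or.inl h)
        · exact Or.inl (Or.inr rfl)
        · exact Or.inr ⟨h1, h2⟩
    · rw [if_neg hc]
      simp only [List.mem_cons]
      constructor
      · rintro (h | ⟨h1, h2⟩)
        · exact Or.inl h
        · exact Or.inr ⟨Or.inr h1, h2⟩
      · rintro (h | ⟨rfl | h1, h2⟩)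
        · exact Or.inl h
        · exact absurd h2 hc
        · exact Or.inr ⟨h1, h2⟩

lemma pvBottomsB_mem (f q : List Int) (full k nn : Int) :
    ∀ (bs : List Int) (acc : PySem.Set Int) (x : Int),
      x ∈ pvBottomsB f q full k nn acc bs
        ↔ x ∈ acc ∨ ∃ b ∈ bs, (x ∈ PySem.List.pyRange 0 (k + 1) 1 ∧
            pvOkB (PySem.List.slice f (some (b - nn + 1)) (some (b + 1)))
              (q.map (fun (y : Int) => y <<< (k - x).toNat)) full = true) := by
  intro bs
  induction bs with
  | nil => intro acc x; simp [pvBottomsB]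
  | cons b bs ih =>
    intro acc x
    simp only [pvBottomsB]
    rw [ih, pvShiftsB_mem]
    simp only [List.mem_cons]
    constructor
    · rintro ((h | ⟨h1, h2⟩) | ⟨b', hb', h3⟩)
      · exact Or.inl h
      · exact Or.inr ⟨b, Or.inl rfl, h1, h2⟩
      · exact Or.inr ⟨b', Or.inr hb', h3⟩
    · rintro (h | ⟨b', rfl | hb', h3⟩)
      · exact Or.inl (Or.inl h)
      · exact Or.inl (Or.inr h3)
      · exact Or.inr ⟨b', hb', h3⟩

-- the ascending first-match scan equals the minimum of the collected valid set
lemma pvScan_eq_min (f q : List Int) (full : Int) (kk : Nat) (m n : Int) (V : List Int) :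
    ∀ (d : Nat) (a : Int), ((kk : Int) + 1 - a).toNat = d →
      (∀ x : Int, x ∈ V ↔ (a ≤ x ∧ x < (kk : Int) + 1 ∧
        ((PySem.List.pyRange (n - 1) m 1).any (fun bottom =>
          pvOkB (PySem.List.slice f (some (bottom - n + 1)) (some (bottom + 1)))
            (q.map (fun (v : Int) => v <<< (kk - x.toNat))) full)) = true)) →
      pvShiftScan f q full kk m n (PySem.List.pyRange a ((kk : Int) + 1) 1)
        = (match PySem.List.min? V (fun x => x) with
           | some v => v
           | none => -1) := by
  intro d
  induction d with
  | zero =>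
    intro a hd hV
    rw [PySem.List.pyRange_one_eq_nil (by omega)]
    have hnil : V = [] := by
      rw [List.eq_nil_iff_forall_not_mem]
      intro x hx
      have := (hV x).1 hx
      omega
    subst hnil
    have hmin : PySem.List.min? ([] : List Int) (fun x => x) = none := by
      rw [PySem.List.min?_eq_none_iff]
    rw [hmin]
    simp [pvShiftScan]
  | succ d ih =>
    intro a hd hV
    rw [PySem.List.pyRange_one_cons (by omega)]
    simp only [pvShiftScan]
    by_cases hG : ((PySem.List.pyRange (n - 1) m 1).any (fun bottom =>
        pvOkB (PySem.List.slice f (some (bottom - n + 1)) (some (bottom + 1)))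
          (q.map (fun (v : Int) => v <<< (kk - a.toNat))) full)) = true
    · rw [if_pos hG]
      have haV : a ∈ V := (hV a).2 ⟨le_refl a, by omega, hG⟩
      cases hmin : PySem.List.min? V (fun x => x) with
      | none =>
        rw [PySem.List.min?_eq_none_iff] at hmin
        rw [hmin] at haV
        simp at haV
      | some v =>
        have h1 : v ∈ V := PySem.List.min?_mem hmin
        have h2 : a ≤ v := ((hV v).1 h1).1
        have h3 : v ≤ a := PySem.List.min?_id_le hmin a haV
        show a = v
        omega
    · rw [if_neg hG]
      refine ih (a + 1) (by omega) (fun x => ?_)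
      rw [hV x]
      constructor
      · rintro ⟨u1, u2, u3⟩
        have hxa : x ≠ a := by
          intro he
          subst he
          exact hG u3
        exact ⟨by omega, u2, u3⟩
      · rintro ⟨u1, u2, u3⟩
        exact ⟨by omega, u2, u3⟩

-- ===== VERDICT (by name: the statement is the Claim_ definition above) =====
theorem solution_spec : Claim_equal_solution := by
  intro field figure _hdom hpre
  obtain ⟨hf, hg, hle⟩ := hpre
  unfold Spec_solution solution_alt
  dsimp only
  rw [pvA_eq_scan field figure hle]
  set cf := (PySem.List.pyGetD field 0 []).length with hcf
  set cp := (PySem.List.pyGetD figure 0 []).length with hcp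
  have hK : (cf : Int) - (cp : Int) + 1 = ((cf - cp : Nat) : Int) + 1 := by omega
  rw [hK]
  simp only [List.length_map]
  refine pvScan_eq_min (field.map pvPackB) (figure.map pvPackB) (((1 : Int) <<< cf) - 1)
    (cf - cp) (field.length : Int) (figure.length : Int) _ (cf - cp + 1) 0 (by omega)
    (fun x => ?_)
  rw [pvBottomsB_mem]
  simp only [PySem.Set.empty, List.not_mem_nil, false_or]
  constructor
  · rintro ⟨b, hb, hx, hok⟩
    rw [PySem.List.mem_pyRange_one] at hx
    have hxb : 0 ≤ x ∧ x < (cf : Int) - (cp : Int) + 1 := ⟨hx.1, hx.2⟩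
    refine ⟨by omega, by omega, ?_⟩
    rw [pvAnyRange_iff]
    rw [PySem.List.mem_pyRange_one] at hb
    refine ⟨b, hb.1, hb.2, ?_⟩
    have he : ((cf : Int) - (cp : Int) - x).toNat = (cf - cp) - x.toNat := by omega
    rwa [he] at hok
  · rintro ⟨h0, h1, hany⟩
    rw [pvAnyRange_iff] at hany
    obtain ⟨b, hb1, hb2, hok⟩ := hany
    refine ⟨b, by rw [PySem.List.mem_pyRange_one]; exact ⟨hb1, hb2⟩, ?_, ?_⟩
    · rw [PySem.List.mem_pyRange_one]
      omega
    · have he : ((cf : Int) - (cp : Int) - x).toNat = (cf - cp) - x.toNat := by omega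
      rwa [he]
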